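-- pv_equiv track=rewrite | github.com/jykim256/PowerSchool-Analyzer | v2.0 (BS4)/Datareader.py | classAnalysis
-- ===== SOURCE A (Python) =====
-- exclude = True
--
-- notRecord = ['Excluded','Exempt']
--
-- catIndex = 1
--
-- def classAnalysis(grades,className):
-- 	period = grades
-- 	excludeIndex = 7
-- 	numLetter = 'D'
-- 	denLetter = 'E'
--
-- 	# count number of grading categories there are
-- 	allCat = [period[i][catIndex] for i in range(len(period))]
-- 	trueCat = list(map(lambda x: allCat[x] in allCat[0:x], range(len(period))))
-- 	numCat = len(trueCat) - sum(trueCat)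
-- 	categories = ['' for _ in range(numCat)]
-- 	k = 0
-- 	for i in range(len(allCat)):
-- 		if not(trueCat[i]):
-- 			categories[k] = allCat[i]
-- 			k += 1
--
-- 	# separates assignments by category and records the indices
-- 	catIndices = [[] for _ in range(numCat)]
-- 	for i in range(len(period)):
-- 		for j in range(len(categories)):
-- 			if(period[i][catIndex] == categories[j]):
-- 				# appends the indexes
-- 				if exclude:
-- 					try:
-- 						float(period[i][5])
-- 						if not(period[i][excludeIndex] in notRecord):
-- 							catIndices[j].append(i)
-- 					except:
-- 						pass
-- 				else:
-- 					catIndices[j].append(i)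
--
-- 	num = ['' for _ in range(numCat)]; den = ['' for _ in range(numCat)]
-- 	for i in range(len(catIndices)):
-- 		a = '='
-- 		b = '='
-- 		for j in catIndices[i]:
-- 			# add one bc Excel is 1 index system, then another bc top row adds one
-- 			a += denLetter + str(j+2) + '+'
-- 			b += numLetter + str(j+2) + '+'
-- 		den[i] = a[:-1]; num[i] = b[:-1]
-- 	return [categories,num,den]
-- ===== SOURCE B (Python) =====
-- # B: one pass with an order-preserving dict bucketing indices by category,
-- # replacing A's dedup pass and nested category-matching loop.
-- exclude = True
--
-- notRecord = ['Excluded', 'Exempt']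
--
-- catIndex = 1
--
--
-- def _keep(row):
--     # exclude filter: float(row[5]) must parse and row[7] must not be excluded
--     try:
--         float(row[5])
--         return row[7] not in notRecord
--     except (ValueError, IndexError):
--         return False
--
--
-- def _formula(letter, idxs):
--     # '' for an empty bucket (mirrors '=' with nothing appended, chopped)
--     if not idxs:
--         return ''
--     return '=' + '+'.join(letter + str(j + 2) for j in idxs)
--
--
-- def classAnalysis(grades, className):
--     buckets = {}
--     for i, row in enumerate(grades):
--         bucket = buckets.setdefault(row[catIndex], [])
--         if _keep(row):
--             bucket.append(i)
--     return [list(buckets.keys()),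
--             [_formula('D', b) for b in buckets.values()],
--             [_formula('E', b) for b in buckets.values()]]
-- ===== Notes on version B (the rewrite author's own statement) =====
-- stated objective: simpler
-- what changed: B replaces A's dedup pass (allCat/trueCat/fill loop) and its nested category-matching double loop with a single pass that buckets row indices into an order-preserving dict keyed by category (setdefault registers every category so order and empty buckets match A, append only when the exclude filter passes), then emits categories and the formula strings straight from the dict.
import Mathlib
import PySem

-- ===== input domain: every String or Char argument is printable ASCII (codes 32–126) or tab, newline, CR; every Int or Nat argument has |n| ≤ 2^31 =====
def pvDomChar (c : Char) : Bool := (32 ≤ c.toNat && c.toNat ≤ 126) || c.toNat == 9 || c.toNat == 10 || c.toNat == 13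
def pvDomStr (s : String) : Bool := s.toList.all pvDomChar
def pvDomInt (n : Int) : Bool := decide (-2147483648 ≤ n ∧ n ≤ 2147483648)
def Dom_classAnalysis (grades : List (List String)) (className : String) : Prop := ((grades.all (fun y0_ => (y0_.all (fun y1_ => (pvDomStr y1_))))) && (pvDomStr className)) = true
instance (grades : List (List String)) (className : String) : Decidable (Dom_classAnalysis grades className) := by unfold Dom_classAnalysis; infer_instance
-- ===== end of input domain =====

-- B groups assignment indices by category in ONE dict-bucketing pass (no dedup pass, no
-- nested category scan); equal return value proved on Pre_ (every row has ≥ 2 cells).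

-- ===== PORT A =====
-- locals of A become helper defs of `period`, each a literal transliteration of its Python line

-- module constant `exclude = True`
def pvExclude : Bool := true

-- module constant `notRecord = ['Excluded','Exempt']`
def pvNotRecord : List String := ["Excluded", "Exempt"]

-- `row[catIndex]` with catIndex = 1 (Pre_ makes it in range, the "" default is never used on Pre_)
def pvCat (row : List String) : String := PySem.List.pyGetD row 1 ""

-- hand port of Python's float(s) acceptance test (True = float(s) returns, False = ValueError).
-- Exact on the ASCII domain: strip whitespace, optional sign, then inf/infinity/nan
-- (case-insensitive) or a decimal mantissa/exponent with single '_' between digits.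
-- pvParseRun consumes a maximal digit run `D ('_' D | D)*`, returning (#digits, rest).
def pvParseRun : List Char → Nat × List Char
  | [] => (0, [])
  | c :: cs =>
    if c.isDigit then
      match h : cs with
      | '_' :: d :: cs2 =>
        if d.isDigit then
          let p := pvParseRun (d :: cs2)
          (p.1 + 1, p.2)
        else (1, cs)
      | _ =>
        let p := pvParseRun cs
        (p.1 + 1, p.2)
    else (0, c :: cs)
termination_by l => l.length
decreasing_by all_goals (simp_all only [List.length_cons]; omega)

def pvIsFloatSpace (c : Char) : Bool :=
  c == ' ' || c == '\t' || c == '\n' || c == '\r' || c == Char.ofNat 11 || c == Char.ofNat 12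

def pvFloatOk (s : String) : Bool :=
  let l := ((s.toList.dropWhile pvIsFloatSpace).reverse.dropWhile pvIsFloatSpace).reverse
  let l := match l with
    | c :: cs => if c == '+' || c == '-' then cs else c :: cs
    | [] => []
  let low := l.map Char.toLower
  if low == ['i','n','f'] || low == ['i','n','f','i','n','i','t','y'] || low == ['n','a','n'] then
    true
  else
    let p1 := pvParseRun l
    let p2 := match p1.2 with
      | '.' :: rest => pvParseRun rest
      | _ => ((0 : Nat), p1.2)
    if p1.1 + p2.1 == 0 then false
    else
      match p2.2 with
      | [] => true
      | e :: rest =>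
        if e == 'e' || e == 'E' then
          let rest2 := match rest with
            | c :: cs => if c == '+' || c == '-' then cs else c :: cs
            | [] => ([] : List Char)
          let p3 := pvParseRun rest2
          decide (0 < p3.1) && p3.2.isEmpty
        else false

-- the try/except filter: `float(row[5])` must return (IndexError/ValueError caught)
-- and then `row[7] not in notRecord` (IndexError on row[7] caught too → no append)
def pvKeep (row : List String) : Bool :=
  match PySem.List.pyGet? row 5 with
  | none => false
  | some s5 =>
    if pvFloatOk s5 then
      match PySem.List.pyGet? row 7 with
      | none => false
      | some s7 => !(pvNotRecord.contains s7)
    else false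

-- allCat = [period[i][catIndex] for i in range(len(period))]
def pvAllCatA (period : List (List String)) : List String :=
  (PySem.List.pyRange 0 (PySem.List.len period)).map
    (fun i => pvCat (PySem.List.pyGetD period i []))

-- trueCat = list(map(lambda x: allCat[x] in allCat[0:x], range(len(period))))
def pvTrueCatA (period : List (List String)) : List Bool :=
  (PySem.List.pyRange 0 (PySem.List.len period)).map
    (fun x => (PySem.List.slice (pvAllCatA period) (some 0) (some x)).contains
      (PySem.List.pyGetD (pvAllCatA period) x ""))

-- numCat = len(trueCat) - sum(trueCat)   (sum of booleans counts the Trues; count ≤ length so Nat subtraction is exact)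
def pvNumCatA (period : List (List String)) : Nat :=
  (pvTrueCatA period).length - (pvTrueCatA period).countP id

-- categories = ['' for _ in range(numCat)]; k = 0; for i in range(len(allCat)): if not(trueCat[i]): categories[k] = allCat[i]; k += 1
def pvCategoriesA (period : List (List String)) : List String :=
  ((PySem.List.pyRange 0 (PySem.List.len (pvAllCatA period))).foldl
    (fun (s : List String × Nat) i =>
      if !(PySem.List.pyGetD (pvTrueCatA period) i false) then
        (s.1.set s.2 (PySem.List.pyGetD (pvAllCatA period) i ""), s.2 + 1)
      else s)
    (List.replicate (pvNumCatA period) "", 0)).1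

-- catIndices = [[] for _ in range(numCat)]; double loop appending i where categories[j] matches
def pvCatIndicesA (period : List (List String)) : List (List Int) :=
  (PySem.List.pyRange 0 (PySem.List.len period)).foldl
    (fun L i =>
      let row := PySem.List.pyGetD period i []
      (PySem.List.pyRange 0 (PySem.List.len (pvCategoriesA period))).foldl
        (fun (L : List (List Int)) j =>
          if pvCat row == PySem.List.pyGetD (pvCategoriesA period) j "" then
            if pvExclude then
              if pvKeep row then L.set j.toNat (L.getD j.toNat [] ++ [i]) else L
            else L.set j.toNat (L.getD j.toNat [] ++ [i])
          else L) L)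
    (List.replicate (pvNumCatA period) [])

-- a = '='; for j in idxs: a += letter + str(j+2) + '+'; then a[:-1]
def pvBuildA (letter : String) (idxs : List Int) : String :=
  PySem.Str.slice
    (idxs.foldl (fun a j => a ++ letter ++ PySem.Int.toStr (j + 2) ++ "+") "=")
    none (some (-1))

-- num/den loop: for i in range(len(catIndices)): num[i] = b[:-1]; den[i] = a[:-1]
-- (a and b are built independently in the same pass; ported as two pvBuildA builds)
def pvNumDenA (period : List (List String)) : List String × List String :=
  (PySem.List.pyRange 0 (PySem.List.len (pvCatIndicesA period))).foldl
    (fun (s : List String × List String) i =>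
      let idxs := PySem.List.pyGetD (pvCatIndicesA period) i []
      (s.1.set i.toNat (pvBuildA "D" idxs), s.2.set i.toNat (pvBuildA "E" idxs)))
    (List.replicate (pvNumCatA period) "", List.replicate (pvNumCatA period) "")

def classAnalysis (grades : List (List String)) (className : String) : List (List String) :=
  [pvCategoriesA grades, (pvNumDenA grades).1, (pvNumDenA grades).2]

-- ===== PORT B =====
-- transliterates Source B: _keep, _formula, one bucketing pass; float() modelled afresh below

def bNotRecord : List String := ["Excluded", "Exempt"]

def bWs (u : Char) : Bool := u.toNat == 32 || (9 ≤ u.toNat && u.toNat ≤ 13)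

def bLstrip : List Char → List Char
  | [] => []
  | u :: us => cond (bWs u) (bLstrip us) (u :: us)

def bStrip (zs : List Char) : List Char := (bLstrip (bLstrip zs).reverse).reverse

def bSign : List Char → List Char
  | [] => []
  | u :: us => cond (u == '+') us (cond (u == '-') us (u :: us))

def bRunAux : List Char → Nat → Nat × List Char
  | '_' :: nx :: more, acc => if nx.isDigit then bRunAux more (acc + 1) else (acc, '_' :: nx :: more)
  | nx :: more, acc => if nx.isDigit then bRunAux more (acc + 1) else (acc, nx :: more)
  | [], acc => (acc, [])
termination_by zs _ => zs.length
decreasing_by all_goals (simp_all only [List.length_cons]; omega)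

def bRun : List Char → Nat × List Char
  | [] => (0, [])
  | y :: ys => if y.isDigit then bRunAux ys 1 else (0, y :: ys)

def bMant (zs : List Char) : Nat × List Char :=
  match bRun zs with
  | (whole, '.' :: fr) => (match bRun fr with | (fd, rem) => (whole + fd, rem))
  | (whole, rem) => (whole, rem)

def bExpOk : List Char → Bool
  | [] => true
  | em :: tailE =>
    cond (em == 'e' || em == 'E')
      (match bRun (bSign tailE) with | (cntE, remE) => decide (0 < cntE) && remE.isEmpty)
      false

def bWord (zs : List Char) : Bool :=
  ["inf".toList, "infinity".toList, "nan".toList].contains (zs.map Char.toLower)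

def bFloatOk (sv : String) : Bool :=
  let zs := bSign (bStrip sv.toList)
  cond (bWord zs)
    true
    (match bMant zs with
     | (0, _) => false
     | (_ + 1, remE) => bExpOk remE)

def bCat (rec : List String) : String :=
  match PySem.List.pyGet? rec 1 with
  | some nm => nm
  | none => ""

def bKeep (rec : List String) : Bool :=
  (match PySem.List.pyGet? rec 5 with
   | some v => bFloatOk v
   | none => false)
  && (match PySem.List.pyGet? rec 7 with
      | some w => !(bNotRecord.contains w)
      | none => false)

def bForm (tag : String) (xs : List Int) : String :=
  match xs with
  | [] => ""
  | _ :: _ =>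
    "=" ++ PySem.Str.join "+" (xs.map (fun jx => tag ++ PySem.Int.toStr (jx + 2)))

def bLoop : Int → List (List String) → PySem.Dict String (List Int) → PySem.Dict String (List Int)
  | _, [], acc => acc
  | ix, rec :: rows, acc =>
    let acc1 := acc.setdefault (bCat rec) []
    bLoop (ix + 1) rows (cond (bKeep rec) (acc1.modify (bCat rec) [] (· ++ [ix])) acc1)

def classAnalysis_alt (grades : List (List String)) (className : String) : List (List String) :=
  let table := bLoop 0 grades PySem.Dict.empty
  [table.keys, table.values.map (bForm "D"), table.values.map (bForm "E")]

-- ===== PRECONDITION & SPEC =====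
-- Pre_ excludes exactly the inputs where both Pythons raise IndexError: a row with fewer
-- than 2 cells makes `period[i][catIndex]` (A) / `row[catIndex]` (B) raise.
def Pre_classAnalysis (grades : List (List String)) (className : String) : Prop :=
  (grades.all (fun row => decide (2 ≤ row.length))) = true

instance (grades : List (List String)) (className : String) : Decidable (Pre_classAnalysis grades className) := by
  unfold Pre_classAnalysis; infer_instance

def pvWitness_classAnalysis : List (List String) × String :=
  ([["a1", "HW", "", "", "", "1.5", "", "Collected"],
    ["a2", "HW", "", "", "", "bad"],
    ["a3", "Quiz", "", "", "", "2", "", "Excluded"]], "Algebra")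

def Spec_classAnalysis (grades : List (List String)) (className : String) (out : List (List String)) : Prop := out = classAnalysis_alt grades className
instance (grades : List (List String)) (className : String) (out : List (List String)) : Decidable (Spec_classAnalysis grades className out) := by unfold Spec_classAnalysis; infer_instance

-- ===== CLAIM (what is proved, stated in full; the proofs are below) =====
def Claim_equal_classAnalysis : Prop := ∀ (grades : List (List String)) (className : String), Dom_classAnalysis grades className → Pre_classAnalysis grades className → Spec_classAnalysis grades className (classAnalysis grades className)

-- ===== LEMMAS AND PROOFS =====

-- common mid-level description of the result both ports compute
def pvAll (g : List (List String)) : List String := g.map pvCat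

def pvCats (g : List (List String)) : List String := PySem.Set.ofList (pvAll g)

def pvBucket (g : List (List String)) (c : String) : List Int :=
  ((PySem.List.enumerate g).filter (fun p => (pvCat p.2 == c) && pvKeep p.2)).map (fun p => p.1)

def pvFormula (letter : String) (idxs : List Int) : String :=
  if idxs.isEmpty then ""
  else "=" ++ PySem.Str.join "+" (idxs.map (fun j => letter ++ PySem.Int.toStr (j + 2)))

def pvResult (g : List (List String)) : List (List String) :=
  [pvCats g,
   (pvCats g).map (fun c => pvFormula "D" (pvBucket g c)),
   (pvCats g).map (fun c => pvFormula "E" (pvBucket g c))]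

-- ---- B's helpers agree with A's model of the same builtins ----

-- the continuation of pvParseRun after one consumed digit
def pvCont (cs : List Char) : Nat × List Char :=
  match cs with
  | '_' :: d :: cs2 => if d.isDigit then pvParseRun (d :: cs2) else (0, '_' :: d :: cs2)
  | _ => pvParseRun cs

lemma pvParseRun_cons (c : Char) (cs : List Char) :
    pvParseRun (c :: cs) =
      if c.isDigit then ((pvCont cs).1 + 1, (pvCont cs).2) else (0, c :: cs) := by
  cases hd : c.isDigit
  · rw [pvParseRun.eq_def]; simp [hd]
  · rw [pvParseRun.eq_def]
    simp only [hd, if_true]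
    unfold pvCont
    split
    · split <;> simp_all
    · rename_i h1
      split
      · exfalso; exact h1 _ _ rfl
      · rfl

lemma bRunAux_nil (n : Nat) : bRunAux [] n = (n, []) := by
  rw [bRunAux.eq_def]

lemma bRunAux_eq : ∀ (N : Nat) (cs : List Char), cs.length ≤ N → ∀ n,
    bRunAux cs n = (n + (pvCont cs).1, (pvCont cs).2) := by
  intro N
  induction N with
  | zero =>
    intro cs h n
    have : cs = [] := List.length_eq_zero_iff.mp (Nat.le_zero.mp h)
    subst this
    simp [bRunAux_nil, pvCont, pvParseRun]
  | succ N ih =>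
    intro cs h n
    rcases cs with _ | ⟨d, _ | ⟨e, cs2⟩⟩
    · simp [bRunAux_nil, pvCont, pvParseRun]
    · -- cs = [d] : both matches reduce structurally to their catch-all arms
      simp only [bRunAux, pvCont]
      cases hd : d.isDigit
      · simp [hd, pvParseRun_cons, pvCont, pvParseRun]
      · simp [hd, bRunAux_nil, pvParseRun_cons, pvCont, pvParseRun]
    · by_cases hu : d = '_'
      · subst hu
        simp only [bRunAux, pvCont]
        cases he : e.isDigit
        · simp [he]
        · simp only [he, if_true]
          rw [ih cs2 (by simp at h ⊢; omega) (n+1), pvParseRun_cons, he]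
          simp only [if_true]
          refine Prod.ext ?_ rfl
          simp; omega
      · rw [bRunAux.eq_def]
        have hc : pvCont (d :: e :: cs2) = pvParseRun (d :: e :: cs2) := by
          unfold pvCont
          split
          · rename_i x y heq
            exfalso
            injection heq with h1 h2
            exact hu h1
          · rfl
        rw [hc, pvParseRun_cons]
        split
        · exfalso; simp_all
        · rename_i a b heq
          injection heq with h1 h2
          subst h1
          subst h2
          cases hd : d.isDigit
          · simp [hd]
          · simp only [hd, if_true]
            rw [ih (e :: cs2) (by simp at h ⊢; omega)]
            refine Prod.ext ?_ rfl
            simp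
            omega
        · exfalso; simp_all

lemma bRun_eq (l : List Char) : bRun l = pvParseRun l := by
  cases l with
  | nil => simp [bRun, pvParseRun]
  | cons c cs =>
    rw [pvParseRun_cons]
    simp only [bRun]
    cases h : c.isDigit
    · simp
    · simp only [if_true]
      rw [bRunAux_eq cs.length cs le_rfl 1]
      refine Prod.ext ?_ rfl
      simp
      omega


lemma bLstrip_eq (l : List Char) : bLstrip l = l.dropWhile bWs := by
  induction l with
  | nil => rfl
  | cons c cs ih =>
    simp only [bLstrip, List.dropWhile_cons]
    cases h : bWs c <;> simp [h, ih]

lemma bSign_eq (l : List Char) :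
    bSign l = (match l with
      | c :: cs => if c == '+' || c == '-' then cs else c :: cs
      | [] => []) := by
  cases l with
  | nil => rfl
  | cons c cs =>
    simp only [bSign]
    by_cases h1 : c == '+'
    · simp [h1]
    · by_cases h2 : c == '-' <;> simp [h1, h2]

lemma bWs_pv : bWs = pvIsFloatSpace := by
  funext c
  unfold bWs pvIsFloatSpace
  have h : ∀ d : Char, (c == d) = (c.toNat == d.toNat) := by
    intro d
    by_cases hd : c = d
    · subst hd; simp
    · have hne : c.toNat ≠ d.toNat := fun hn => hd (by
        apply Char.ext; unfold Char.toNat at hn; exact UInt32.toNat_inj.mp hn)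
      simp [hd, hne]
  simp only [h]
  have e5 : (Char.ofNat 11).toNat = 11 := rfl
  have e6 : (Char.ofNat 12).toNat = 12 := rfl
  rw [show (' ').toNat = 32 from rfl, show ('\t').toNat = 9 from rfl,
    show ('\n').toNat = 10 from rfl, show ('\r').toNat = 13 from rfl, e5, e6]
  rw [Bool.eq_iff_iff]
  simp only [Bool.or_eq_true, Bool.and_eq_true, beq_iff_eq, decide_eq_true_eq]
  omega

lemma bStrip_eq (l : List Char) :
    bStrip l = ((l.dropWhile pvIsFloatSpace).reverse.dropWhile pvIsFloatSpace).reverse := by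
  unfold bStrip
  rw [bLstrip_eq, bLstrip_eq, bWs_pv]

lemma bExpOk_eq (r : List Char) :
    bExpOk r = (match r with
      | [] => true
      | e :: rest =>
        if e == 'e' || e == 'E' then
          decide (0 < (pvParseRun (match rest with
              | c :: cs => if c == '+' || c == '-' then cs else c :: cs
              | [] => ([] : List Char))).1)
            && (pvParseRun (match rest with
              | c :: cs => if c == '+' || c == '-' then cs else c :: cs
              | [] => ([] : List Char))).2.isEmpty
        else false) := by
  cases r with
  | nil => rfl
  | cons e rest =>
    simp only [bExpOk]
    cases hb : (e == 'e' || e == 'E')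
    · simp [hb]
    · simp only [hb, cond_true, if_true]
      rw [bRun_eq, bSign_eq]

lemma bWord_eq (l : List Char) : bWord l = (l.map Char.toLower == ['i','n','f']
    || l.map Char.toLower == ['i','n','f','i','n','i','t','y']
    || l.map Char.toLower == ['n','a','n']) := by
  simp only [bWord, List.contains_cons, List.contains_nil, Bool.or_false, Bool.or_assoc]
  rfl

lemma bFloatOk_tail (l : List Char) :
    (cond (bWord l) true
      (match bMant l with
       | (0, _) => false
       | (_ + 1, r) => bExpOk r)) =
    (if (l.map Char.toLower == ['i','n','f'] || l.map Char.toLower == ['i','n','f','i','n','i','t','y']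
          || l.map Char.toLower == ['n','a','n']) then
      true
    else
      if (pvParseRun l).1 + (match (pvParseRun l).2 with
            | '.' :: rest => pvParseRun rest
            | _ => ((0 : Nat), (pvParseRun l).2)).1 == 0 then false
      else
        match (match (pvParseRun l).2 with
            | '.' :: rest => pvParseRun rest
            | _ => ((0 : Nat), (pvParseRun l).2)).2 with
        | [] => true
        | e :: rest =>
          if e == 'e' || e == 'E' then
            decide (0 < (pvParseRun (match rest with
                | c :: cs => if c == '+' || c == '-' then cs else c :: cs
                | [] => ([] : List Char))).1)
              && (pvParseRun (match rest with
                | c :: cs => if c == '+' || c == '-' then cs else c :: cs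
                | [] => ([] : List Char))).2.isEmpty
          else false) := by
  cases hw : bWord l
  · rw [bWord_eq] at hw
    simp only [hw, cond_false, Bool.false_eq_true, if_false]
    rcases hp : pvParseRun l with ⟨m, r⟩
    have hbm : bMant l = (match ((m, r) : Nat × List Char) with
      | (m, '.' :: t) => (match bRun t with | (f, rr) => (m + f, rr))
      | (m, rr) => (m, rr)) := by
      unfold bMant
      rw [bRun_eq, hp]
    dsimp only
    rcases r with _ | ⟨c0, rest⟩
    · rw [show bMant l = (m, []) from hbm]
      dsimp only
      cases m with
      | zero => simp
      | succ k => simp [bExpOk]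
    · by_cases hc0 : c0 = '.'
      · subst hc0
        have hbm' : bMant l = (m + (pvParseRun rest).1, (pvParseRun rest).2) := by
          rw [hbm]
          split
          · rename_i m2 t heq
            injection heq with h1 h2
            injection h2 with h3 h4
            subst h1
            subst h4
            rw [bRun_eq]
          · rename_i x y hno heq
            injection heq with h1 h2
            exact absurd h2.symm (fun hh => hno rest hh)
        have hA2 : (match '.' :: rest with
            | '.' :: rest => pvParseRun rest
            | x => ((0 : Nat), '.' :: rest)) = pvParseRun rest := by
          split
          · rename_i t heq
            injection heq with h1 h2
            exact congrArg pvParseRun h2.symm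
          · rename_i x hno
            exact absurd rfl (hno rest)
        rw [hbm', hA2]
        rcases hq : pvParseRun rest with ⟨f, rr⟩
        dsimp only
        generalize m + f = S
        cases S with
        | zero => simp
        | succ k =>
          simp only [Nat.succ_ne_zero, beq_iff_eq, if_false]
          rw [bExpOk_eq]
      · have hbm' : bMant l = (m, c0 :: rest) := by
          rw [hbm]
          split
          · rename_i t heq
            exfalso
            injection heq with h1 h2
            injection h2 with h3 h4
            exact hc0 h3
          · rename_i x y heq
            exact heq.symm
        rw [hbm']
        have hA : (match c0 :: rest with
            | '.' :: rest => pvParseRun rest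
            | _ => ((0 : Nat), c0 :: rest)) = ((0 : Nat), c0 :: rest) := by
          split
          · rename_i rest2 heq
            exfalso
            injection heq with h1 h2
            exact hc0 h1
          · rfl
        rw [hA]
        dsimp only
        cases m with
        | zero => simp
        | succ k =>
          simp only [Nat.add_zero, Nat.succ_ne_zero, beq_iff_eq, if_false]
          rw [bExpOk_eq]
  · rw [bWord_eq] at hw
    simp only [hw, cond_true, if_true]

lemma bFloatOk_eq (s : String) : bFloatOk s = pvFloatOk s := by
  unfold bFloatOk pvFloatOk
  dsimp only
  rw [bStrip_eq, ← bSign_eq]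
  exact bFloatOk_tail _


lemma bCat_eq (row : List String) : bCat row = pvCat row := by
  unfold bCat pvCat PySem.List.pyGetD
  cases PySem.List.pyGet? row 1 <;> rfl

lemma bKeep_eq (row : List String) : bKeep row = pvKeep row := by
  unfold bKeep pvKeep
  cases PySem.List.pyGet? row 5 with
  | none => simp
  | some v =>
    dsimp only
    rw [bFloatOk_eq]
    cases h : pvFloatOk v
    · simp [h]
    · cases PySem.List.pyGet? row 7 <;> simp [h, bNotRecord, pvNotRecord]

lemma bForm_pvFormula (letter : String) (idxs : List Int) :
    bForm letter idxs = pvFormula letter idxs := by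
  cases idxs <;> simp [bForm, pvFormula]

-- ---- generic fold lemmas ----

lemma pvGetDSet {σ : Type} (l : List σ) (k j : Nat) (v d : σ) (h : j < l.length) :
    (l.set k v).getD j d = if k = j then v else l.getD j d := by
  by_cases hk : k = j
  · subst hk
    rw [List.getD_eq_getElem _ _ (by simpa using h), List.getElem_set_self (by simpa using h)]
    simp
  · rw [if_neg hk, List.getD_eq_getElem _ _ (by simpa using h), List.getD_eq_getElem _ _ h,
      List.getElem_set_ne hk]

lemma pvFoldPointwise {α σ : Type} (n : Nat) (step : List σ → α → List σ) (φ : α → Nat → σ → σ) (d : σ)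
    (hlen : ∀ M a, M.length = n → (step M a).length = n)
    (hget : ∀ M a j, M.length = n → j < n → (step M a).getD j d = φ a j (M.getD j d)) :
    ∀ (l : List α) (L : List σ), L.length = n →
      (l.foldl step L).length = n ∧
      ∀ j, j < n → (l.foldl step L).getD j d = l.foldl (fun x a => φ a j x) (L.getD j d) := by
  intro l
  induction l with
  | nil => exact fun L hL => ⟨hL, fun j hj => rfl⟩
  | cons a t ih =>
    intro L hL
    obtain ⟨ihl, ihg⟩ := ih (step L a) (hlen L a hL)
    refine ⟨ihl, fun j hj => ?_⟩
    rw [List.foldl_cons, ihg j hj, hget L a j hL hj, List.foldl_cons]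

lemma pvFoldlSingleHit {σ : Type} (f : σ → σ) (j : Nat) :
    ∀ (l : List Nat), l.Nodup → ∀ x : σ,
      l.foldl (fun x k => if k = j then f x else x) x = if j ∈ l then f x else x := by
  intro l
  induction l with
  | nil => simp
  | cons a t ih =>
    intro hnd x
    have hnd' := (List.nodup_cons.mp hnd).2
    by_cases ha : a = j
    · subst ha
      have hj : a ∉ t := (List.nodup_cons.mp hnd).1
      simp [ih hnd', hj]
    · simp [ha, ih hnd', Ne.symm ha]

lemma pvFoldlSetMapAux {σ : Type} (h : Nat → σ) (n : Nat) (v0 : List σ) (hv : v0.length = n) :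
    ∀ m, m ≤ n →
      (List.range m).foldl (fun v k => v.set k (h k)) v0 = (List.range m).map h ++ v0.drop m := by
  intro m
  induction m with
  | zero => simp
  | succ m ih =>
    intro hm
    have hmn : m < n := by omega
    rw [List.range_succ, List.foldl_append, ih (by omega)]
    simp only [List.foldl_cons, List.foldl_nil, List.map_append, List.map_cons, List.map_nil]
    rw [List.set_append]
    simp only [List.length_map, List.length_range, Nat.lt_irrefl, if_false, Nat.sub_self]
    rw [List.drop_eq_getElem_cons (show m < v0.length by omega), List.set_cons_zero]
    simp

lemma pvFoldlSetMap {σ : Type} (h : Nat → σ) (n : Nat) (v0 : List σ) (hv : v0.length = n) :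
    (List.range n).foldl (fun v k => v.set k (h k)) v0 = (List.range n).map h := by
  rw [pvFoldlSetMapAux h n v0 hv n (le_refl n), List.drop_eq_nil_of_le (by omega), List.append_nil]

lemma pvMapRangeGetD {β : Type} (F : String → β) (d : String) :
    ∀ (l : List String), (List.range l.length).map (fun k => F (l.getD k d)) = l.map F := by
  intro l
  induction l with
  | nil => simp
  | cons a t ih =>
    rw [List.length_cons, List.range_succ_eq_map, List.map_cons, List.map_map]
    simp only [List.getD_cons_zero, Function.comp_def, List.getD_cons_succ]
    rw [ih, List.map_cons]

-- ---- dedup (fill loop) lemmas ----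

lemma pvOfListAppendSingleton {α : Type} [BEq α] (xs : List α) (x : α) :
    PySem.Set.ofList (xs ++ [x]) = PySem.Set.add (PySem.Set.ofList xs) x := by
  simp [PySem.Set.ofList, List.foldl_append]

lemma pvPrefixFoldlAdd {α : Type} [BEq α] :
    ∀ (t : List α) (s : PySem.Set α), s <+: t.foldl PySem.Set.add s := by
  intro t
  induction t with
  | nil => simp
  | cons a u ih =>
    intro s
    refine List.IsPrefix.trans ?_ (ih (PySem.Set.add s a))
    unfold PySem.Set.add
    split
    · exact List.prefix_rfl
    · exact List.prefix_append _ _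

lemma pvOfListAppend (xs ys : List String) :
    PySem.Set.ofList (xs ++ ys) = ys.foldl PySem.Set.add (PySem.Set.ofList xs) := by
  simp [PySem.Set.ofList, List.foldl_append]

lemma pvPrefixOfList (l : List String) (m : Nat) :
    PySem.Set.ofList (l.take m) <+: PySem.Set.ofList l := by
  conv_rhs => rw [← List.take_append_drop m l]
  rw [pvOfListAppend]
  exact pvPrefixFoldlAdd _ _

def pvTC (l : List String) (i : Nat) : Bool := (l.take i).contains (l.getD i "")

lemma pvTCAddEq (l : List String) (m : Nat) (hm : m < l.length) :
    PySem.Set.ofList (l.take (m + 1)) =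
      if pvTC l m then PySem.Set.ofList (l.take m)
      else PySem.Set.ofList (l.take m) ++ [l.getD m ""] := by
  have ht : l.take (m + 1) = l.take m ++ [l.getD m ""] := by
    rw [List.getD_eq_getElem _ _ hm, List.take_add_one, List.getElem?_eq_getElem hm]
    rfl
  rw [ht, pvOfListAppendSingleton]
  unfold PySem.Set.add pvTC
  have hmem : (PySem.Set.ofList (l.take m)).contains (l.getD m "") = (l.take m).contains (l.getD m "") := by
    by_cases h : l.getD m "" ∈ l.take m
    · simp
    · simp
  rw [hmem]

lemma pvCountSpec (l : List String) :
    ∀ m, m ≤ l.length →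
      (PySem.Set.ofList (l.take m)).length + (List.range m).countP (pvTC l) = m := by
  intro m
  induction m with
  | zero => simp [PySem.Set.ofList, PySem.Set.empty]
  | succ m ih =>
    intro h
    have hm : m < l.length := by omega
    rw [List.range_succ, List.countP_append, pvTCAddEq l m hm]
    have := ih (by omega)
    by_cases hc : pvTC l m
    · simp only [hc, if_true]
      simp [hc]
      omega
    · simp only [hc]
      simp [hc]
      omega

lemma pvFillAux (l : List String) :
    ∀ m, m ≤ l.length →
      ((List.range m).foldl
        (fun (s : List String × Nat) i =>
          if !(((List.range l.length).map (pvTC l)).getD i false) then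
            (s.1.set s.2 (l.getD i ""), s.2 + 1)
          else s)
        (List.replicate (PySem.Set.ofList l).length "", 0))
      = (PySem.Set.ofList (l.take m) ++
           List.replicate ((PySem.Set.ofList l).length - (PySem.Set.ofList (l.take m)).length) "",
         (PySem.Set.ofList (l.take m)).length) := by
  intro m
  induction m with
  | zero => simp [PySem.Set.ofList, PySem.Set.empty]
  | succ m ih =>
    intro h
    have hm : m < l.length := by omega
    rw [List.range_succ, List.foldl_append, ih (by omega), List.foldl_cons, List.foldl_nil]
    rw [List.getD_eq_getElem _ _ (by simpa using hm), List.getElem_map,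
      List.getElem_range]
    have hlen1 : (PySem.Set.ofList (l.take (m+1))).length ≤ (PySem.Set.ofList l).length :=
      (pvPrefixOfList l (m+1)).length_le
    by_cases hc : pvTC l m
    · simp [hc, pvTCAddEq l m hm]
    · have hadd := pvTCAddEq l m hm
      rw [if_neg (by simpa using hc)] at hadd
      have hlt : (PySem.Set.ofList (l.take m)).length < (PySem.Set.ofList l).length := by
        rw [hadd] at hlen1
        simp at hlen1
        omega
      simp only [hc, Bool.not_false, if_true, hadd]
      rw [List.set_append]
      simp only [List.length_append, Nat.lt_irrefl, if_false, Nat.sub_self]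
      have hrep : (PySem.Set.ofList l).length - (PySem.Set.ofList (l.take m)).length
          = ((PySem.Set.ofList l).length - ((PySem.Set.ofList (l.take m)).length + 1)) + 1 := by omega
      rw [hrep, List.replicate_succ, List.set_cons_zero]
      simp

lemma pvFillSpec (l : List String) :
    ((List.range l.length).foldl
      (fun (s : List String × Nat) i =>
        if !(((List.range l.length).map (pvTC l)).getD i false) then
          (s.1.set s.2 (l.getD i ""), s.2 + 1)
        else s)
      (List.replicate (PySem.Set.ofList l).length "", 0))
    = (PySem.Set.ofList l, (PySem.Set.ofList l).length) := by
  rw [pvFillAux l l.length (le_refl _)]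
  simp

-- ---- string building lemma: A's fold-and-chop equals the join form ----

lemma pvBuildFoldChars (letter : String) :
    ∀ (idxs : List Int) (s : String),
      (idxs.foldl (fun a j => a ++ letter ++ PySem.Int.toStr (j + 2) ++ "+") s).toList
        = s.toList ++ idxs.flatMap (fun j => letter.toList ++ PySem.Int.toChars (j + 2) ++ ['+']) := by
  intro idxs
  induction idxs with
  | nil => simp
  | cons j t ih =>
    intro s
    rw [List.foldl_cons, ih]
    simp [String.toList_append, PySem.Int.toList_toStr]

lemma pvDropLastFlatMapPlus :
    ∀ (ps : List (List Char)), ps ≠ [] →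
      (ps.flatMap (fun p => p ++ ['+'])).dropLast = PySem.Chars.join ['+'] ps := by
  intro ps
  induction ps with
  | nil => intro h; exact absurd rfl h
  | cons p t ih =>
    intro _
    cases t with
    | nil =>
      rw [List.flatMap_cons, List.flatMap_nil, List.append_nil, List.dropLast_concat,
        PySem.Chars.join_singleton]
    | cons q u =>
      have hne : (q :: u).flatMap (fun p => p ++ ['+']) ≠ [] := by simp
      rw [List.flatMap_cons, List.dropLast_append_of_ne_nil hne, ih (by simp),
        PySem.Chars.join_cons_cons]

lemma pvBuildEqFormula (letter : String) (idxs : List Int) :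
    pvBuildA letter idxs = pvFormula letter idxs := by
  apply String.toList_inj.mp
  unfold pvBuildA
  rw [PySem.Str.slice_to_neg_one, pvBuildFoldChars]
  cases idxs with
  | nil => simp [pvFormula]
  | cons j t =>
    have hne : ((j :: t).map (fun j => letter.toList ++ PySem.Int.toChars (j + 2))) ≠ [] := by simp
    have hfm : (j :: t).flatMap (fun j => letter.toList ++ PySem.Int.toChars (j + 2) ++ ['+'])
        = ((j :: t).map (fun j => letter.toList ++ PySem.Int.toChars (j + 2))).flatMap
            (fun p => p ++ ['+']) := by
      rw [List.flatMap_map]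
    have hjoin := pvDropLastFlatMapPlus _ hne
    have hform : pvFormula letter (j :: t)
        = "=" ++ PySem.Str.join "+" ((j :: t).map (fun j => letter ++ PySem.Int.toStr (j + 2))) := by
      simp [pvFormula]
    rw [hfm]
    have hd : ("=".toList ++ ((j :: t).map fun j => letter.toList ++ PySem.Int.toChars (j + 2)).flatMap (fun p => p ++ ['+'])).dropLast
        = "=".toList ++ PySem.Chars.join ['+'] ((j :: t).map fun j => letter.toList ++ PySem.Int.toChars (j + 2)) := by
      rw [List.dropLast_append_of_ne_nil (by simp), hjoin]
    rw [hd, hform, String.toList_append, PySem.Str.toList_join, List.map_map]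
    have hplus : "+".toList = ['+'] := rfl
    rw [hplus]
    simp [PySem.Int.toList_toStr, Function.comp_def]

-- ---- B-side characterization ----

-- the indices B appends for category c, scanning rows from index i
def bIdx (i : Int) (l : List (List String)) (c : String) : List Int :=
  ((PySem.List.enumerate l i).filter (fun p => (pvCat p.2 == c) && pvKeep p.2)).map (fun p => p.1)

lemma bStepKeys (d : PySem.Dict String (List Int)) (i : Int) (row : List String) :
    (cond (bKeep row) ((d.setdefault (bCat row) []).modify (bCat row) [] (· ++ [i]))
        (d.setdefault (bCat row) [])).keys
      = PySem.Set.add d.keys (pvCat row) := by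
  rw [bCat_eq]
  have hsd : (d.setdefault (pvCat row) []).keys = PySem.Set.add d.keys (pvCat row) := by
    rw [PySem.Dict.keys_setdefault]
    unfold PySem.Set.add
    by_cases h : pvCat row ∈ d.keys
    · rw [if_pos ((PySem.Dict.contains_iff_mem_keys _ _).mpr h), if_pos (by simpa [List.contains_iff_mem] using h)]
    · rw [if_neg (by intro hc; exact h ((PySem.Dict.contains_iff_mem_keys _ _).mp hc)),
        if_neg (by simpa [List.contains_iff_mem] using h)]
  cases hk : bKeep row
  · simpa [hk] using hsd
  · simp only [hk, cond_true]
    rw [PySem.Dict.keys_modify, PySem.Dict.keys_insert_of_contains _ _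
      (by rw [PySem.Dict.contains_setdefault]; simp)]
    exact hsd

lemma bStepGetD (d : PySem.Dict String (List Int)) (i : Int) (row : List String) (c : String) :
    (cond (bKeep row) ((d.setdefault (bCat row) []).modify (bCat row) [] (· ++ [i]))
        (d.setdefault (bCat row) [])).getD c []
      = if (pvCat row == c) && pvKeep row then d.getD c [] ++ [i] else d.getD c [] := by
  rw [bCat_eq]
  have hsd : ∀ c', (d.setdefault (pvCat row) []).getD c' [] = d.getD c' [] := by
    intro c'
    by_cases h : c' = pvCat row
    · subst h; rw [PySem.Dict.getD_setdefault_self]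
    · rw [PySem.Dict.getD_eq_get?_getD, PySem.Dict.get?_setdefault_of_ne _ _ h,
        ← PySem.Dict.getD_eq_get?_getD]
  rw [show bKeep row = pvKeep row from bKeep_eq row]
  cases hk : pvKeep row
  · simp [hk, hsd]
  · simp only [hk, cond_true, Bool.and_true]
    rw [PySem.Dict.getD_modify]
    by_cases h : c = pvCat row
    · subst h; simp [hsd]
    · have hne : ¬ pvCat row = c := fun hh => h hh.symm
      simp [h, hsd, hne]

lemma bLoopKeys :
    ∀ (l : List (List String)) (i : Int) (d : PySem.Dict String (List Int)),
      (bLoop i l d).keys = (l.map pvCat).foldl PySem.Set.add d.keys := by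
  intro l
  induction l with
  | nil => intro i d; rfl
  | cons row t ih =>
    intro i d
    simp only [bLoop, List.map_cons, List.foldl_cons]
    rw [ih, bStepKeys]

lemma bLoopGetD :
    ∀ (l : List (List String)) (i : Int) (d : PySem.Dict String (List Int)) (c : String),
      (bLoop i l d).getD c [] = d.getD c [] ++ bIdx i l c := by
  intro l
  induction l with
  | nil => intro i d c; simp [bLoop, bIdx, PySem.List.enumerate_nil]
  | cons row t ih =>
    intro i d c
    simp only [bLoop]
    rw [ih, bStepGetD]
    unfold bIdx
    rw [PySem.List.enumerate_cons, List.filter_cons]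
    by_cases h : (pvCat row == c) && pvKeep row
    · simp [h]
    · simp [h]

lemma bAlt (g : List (List String)) (cn : String) :
    classAnalysis_alt g cn = pvResult g := by
  unfold classAnalysis_alt pvResult
  have hkeys : (bLoop 0 g PySem.Dict.empty).keys = pvCats g := by
    rw [bLoopKeys]
    rfl
  have hnd : (bLoop 0 g PySem.Dict.empty).keys.Nodup := by
    rw [hkeys]; exact PySem.Set.nodup_ofList _
  have hvals : (bLoop 0 g PySem.Dict.empty).values
      = (pvCats g).map (fun c => pvBucket g c) := by
    rw [PySem.Dict.values_eq_map_keys _ hnd [], hkeys]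
    apply List.map_congr_left
    intro c _
    rw [bLoopGetD]
    simp [bIdx, pvBucket]
  dsimp only
  rw [hkeys, hvals, List.map_map, List.map_map]
  simp [Function.comp_def, bForm_pvFormula]

-- ---- A-side characterization ----

lemma pvAllCatAEq (g : List (List String)) : pvAllCatA g = pvAll g := by
  unfold pvAllCatA pvAll
  have : (PySem.List.pyRange 0 (PySem.List.len g)).map (fun i => pvCat (PySem.List.pyGetD g i []))
      = ((PySem.List.pyRange 0 (PySem.List.len g)).map (fun i => PySem.List.pyGetD g i [])).map pvCat := by
    rw [List.map_map]; rfl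
  rw [this, PySem.List.map_pyGetD_pyRange_zero]

lemma pvTrueCatAEq (g : List (List String)) :
    pvTrueCatA g = (List.range (pvAll g).length).map (pvTC (pvAll g)) := by
  unfold pvTrueCatA
  rw [pvAllCatAEq]
  have hlen : PySem.List.len g = ((pvAll g).length : Int) := by
    simp [PySem.List.len, pvAll]
  rw [hlen, PySem.List.pyRange_zero_natCast, List.map_map]
  apply List.map_congr_left
  intro k _
  simp only [Function.comp_def, pvTC]
  rw [PySem.List.slice_zero_start, PySem.List.slice_to_natCast, PySem.List.pyGetD_natCast]

lemma pvNumCatAEq (g : List (List String)) : pvNumCatA g = (pvCats g).length := by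
  unfold pvNumCatA
  rw [pvTrueCatAEq]
  have hcount := pvCountSpec (pvAll g) (pvAll g).length (le_refl _)
  rw [List.take_length] at hcount
  have h1 : ((List.range (pvAll g).length).map (pvTC (pvAll g))).length = (pvAll g).length := by simp
  have h2 : ((List.range (pvAll g).length).map (pvTC (pvAll g))).countP id
      = (List.range (pvAll g).length).countP (pvTC (pvAll g)) := by
    rw [List.countP_map]; rfl
  have h3 : (List.range (pvAll g).length).countP (pvTC (pvAll g)) ≤ (pvAll g).length := by
    calc (List.range (pvAll g).length).countP (pvTC (pvAll g))
        ≤ (List.range (pvAll g).length).length := List.countP_le_length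
      _ = (pvAll g).length := by simp
  rw [h1, h2]
  unfold pvCats
  omega

lemma pvCategoriesAEq (g : List (List String)) : pvCategoriesA g = pvCats g := by
  unfold pvCategoriesA
  rw [pvNumCatAEq]
  have hlen : PySem.List.len (pvAllCatA g) = (((pvAll g).length : Nat) : Int) := by
    rw [pvAllCatAEq]; rfl
  rw [hlen, PySem.List.pyRange_zero_natCast, List.foldl_map]
  have hbody : (fun (s : List String × Nat) (k : Nat) =>
        if !(PySem.List.pyGetD (pvTrueCatA g) (↑k) false) then
          (s.1.set s.2 (PySem.List.pyGetD (pvAllCatA g) (↑k) ""), s.2 + 1)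
        else s)
      = (fun (s : List String × Nat) (k : Nat) =>
        if !(((List.range (pvAll g).length).map (pvTC (pvAll g))).getD k false) then
          (s.1.set s.2 ((pvAll g).getD k ""), s.2 + 1)
        else s) := by
    funext s k
    rw [PySem.List.pyGetD_natCast, PySem.List.pyGetD_natCast, pvTrueCatAEq, pvAllCatAEq]
  rw [hbody]
  have := pvFillSpec (pvAll g)
  unfold pvCats
  rw [this]

lemma pvInnerLen (row : List String) (i : Int) (cats : List String) (n : Nat) :
    ∀ (ks : List Int) (M : List (List Int)), M.length = n →
      (ks.foldl (fun (L : List (List Int)) j =>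
        if pvCat row == PySem.List.pyGetD cats j "" then
          if pvExclude then
            if pvKeep row then L.set j.toNat (L.getD j.toNat [] ++ [i]) else L
          else L.set j.toNat (L.getD j.toNat [] ++ [i])
        else L) M).length = n := by
  intro ks
  induction ks with
  | nil => exact fun M h => h
  | cons j t ih =>
    intro M h
    rw [List.foldl_cons]
    apply ih
    split_ifs <;> simp [h]

lemma pvInnerGetD (row : List String) (i : Int) (cats : List String) (j : Nat) (hj : j < cats.length) :
    ∀ (M : List (List Int)), M.length = cats.length →
      ((PySem.List.pyRange 0 (PySem.List.len cats)).foldl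
        (fun (L : List (List Int)) jj =>
          if pvCat row == PySem.List.pyGetD cats jj "" then
            if pvExclude then
              if pvKeep row then L.set jj.toNat (L.getD jj.toNat [] ++ [i]) else L
            else L.set jj.toNat (L.getD jj.toNat [] ++ [i])
          else L) M).getD j []
      = (if (pvCat row == cats.getD j "") && pvKeep row then M.getD j [] ++ [i] else M.getD j []) := by
  intro M hM
  rw [show PySem.List.len cats = ((cats.length : Nat) : Int) from rfl,
    PySem.List.pyRange_zero_natCast, List.foldl_map]
  simp only [pvExclude, if_true, PySem.List.pyGetD_natCast, Int.toNat_natCast]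
  have hmain := pvFoldPointwise (α := Nat) (σ := List Int) cats.length
    (fun (L : List (List Int)) (k : Nat) =>
      if pvCat row == cats.getD k "" then
        if pvKeep row then L.set k (L.getD k [] ++ [i]) else L
      else L)
    (fun k j x => if k = j ∧ ((pvCat row == cats.getD k "") && pvKeep row) = true then x ++ [i] else x)
    []
    (fun M' k hM' => by
      beta_reduce
      split
      · split
        · simp [hM']
        · exact hM'
      · exact hM')
    (by
      intro M' k j' hM' hj'
      beta_reduce
      generalize hvk : cats.getD k "" = vk
      by_cases hc : pvCat row = vk
      · by_cases hk : pvKeep row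
        · rw [if_pos (show (pvCat row == vk) = true by simp [hc]), if_pos hk,
            pvGetDSet _ _ _ _ _ (show j' < M'.length by omega)]
          by_cases hkj : k = j'
          · subst hkj; simp [hc, hk]
          · simp [hkj]
        · rw [if_pos (show (pvCat row == vk) = true by simp [hc]), if_neg hk]
          simp [hk]
      · rw [if_neg (by simp [hc])]
        simp [hc])
    (List.range cats.length) M hM
  rw [hmain.2 j hj]
  have hfun : (fun (x : List Int) (k : Nat) =>
        if k = j ∧ ((pvCat row == cats.getD k "") && pvKeep row) = true then x ++ [i] else x)
      = (fun (x : List Int) (k : Nat) =>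
        if k = j then (if (pvCat row == cats.getD j "") && pvKeep row then x ++ [i] else x) else x) := by
    funext x k
    by_cases hkj : k = j
    · subst hkj; by_cases hc : (pvCat row == cats.getD k "") && pvKeep row <;> simp [hc]
    · simp [hkj]
  rw [hfun, pvFoldlSingleHit _ j (List.range cats.length) List.nodup_range,
    if_pos (List.mem_range.mpr hj)]

lemma pvCatIndicesAEq (g : List (List String)) :
    (pvCatIndicesA g).length = (pvCats g).length ∧
    ∀ j, j < (pvCats g).length →
      (pvCatIndicesA g).getD j [] = pvBucket g ((pvCats g).getD j "") := by
  unfold pvCatIndicesA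
  rw [pvNumCatAEq, pvCategoriesAEq]
  have hb : (PySem.List.pyRange 0 (PySem.List.len g)).foldl
      (fun L i =>
        let row := PySem.List.pyGetD g i []
        (PySem.List.pyRange 0 (PySem.List.len (pvCats g))).foldl
          (fun (L : List (List Int)) j =>
            if pvCat row == PySem.List.pyGetD (pvCats g) j "" then
              if pvExclude then
                if pvKeep row then L.set j.toNat (L.getD j.toNat [] ++ [i]) else L
              else L.set j.toNat (L.getD j.toNat [] ++ [i])
            else L) L)
      (List.replicate (pvCats g).length [])
      = (PySem.List.enumerate g).foldl
        (fun L p =>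
          (PySem.List.pyRange 0 (PySem.List.len (pvCats g))).foldl
            (fun (L : List (List Int)) j =>
              if pvCat p.2 == PySem.List.pyGetD (pvCats g) j "" then
                if pvExclude then
                  if pvKeep p.2 then L.set j.toNat (L.getD j.toNat [] ++ [p.1]) else L
                else L.set j.toNat (L.getD j.toNat [] ++ [p.1])
              else L) L)
        (List.replicate (pvCats g).length []) := by
    rw [PySem.List.enumerate_eq_map_pyRange g [], List.foldl_map]
  rw [hb]
  have hmain := pvFoldPointwise (α := Int × List String) (σ := List Int) (pvCats g).length
    (fun L p =>
      (PySem.List.pyRange 0 (PySem.List.len (pvCats g))).foldl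
        (fun (L : List (List Int)) j =>
          if pvCat p.2 == PySem.List.pyGetD (pvCats g) j "" then
            if pvExclude then
              if pvKeep p.2 then L.set j.toNat (L.getD j.toNat [] ++ [p.1]) else L
            else L.set j.toNat (L.getD j.toNat [] ++ [p.1])
          else L) L)
    (fun p j x => if (pvCat p.2 == (pvCats g).getD j "") && pvKeep p.2 then x ++ [p.1] else x)
    []
    (fun M p hM => pvInnerLen p.2 p.1 (pvCats g) (pvCats g).length _ M hM)
    (fun M p j hM hj => pvInnerGetD p.2 p.1 (pvCats g) j hj M hM)
    (PySem.List.enumerate g) (List.replicate (pvCats g).length []) (by simp)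
  obtain ⟨hL, hG⟩ := hmain
  refine ⟨hL, fun j hj => ?_⟩
  rw [hG j hj]
  have hrep : (List.replicate (pvCats g).length ([] : List Int)).getD j [] = [] := by
    rw [List.getD_eq_getElem _ _ (by simpa using hj)]
    simp
  rw [hrep]
  have hfin : (PySem.List.enumerate g).foldl
      (fun (x : List Int) p => if (pvCat p.2 == (pvCats g).getD j "") && pvKeep p.2 then x ++ [p.1] else x) []
      = [] ++ ((PySem.List.enumerate g).filter
          (fun p => (pvCat p.2 == (pvCats g).getD j "") && pvKeep p.2)).map (fun p => p.1) :=
    PySem.List.foldl_append_if _ _ _ _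
  rw [hfin]
  simp [pvBucket]

lemma pvNumDenAEq (g : List (List String)) :
    pvNumDenA g = ((pvCats g).map (fun c => pvFormula "D" (pvBucket g c)),
                   (pvCats g).map (fun c => pvFormula "E" (pvBucket g c))) := by
  obtain ⟨hlen, hget⟩ := pvCatIndicesAEq g
  unfold pvNumDenA
  rw [pvNumCatAEq]
  have hlenc : PySem.List.len (pvCatIndicesA g) = (((pvCats g).length : Nat) : Int) := by
    simp [PySem.List.len, hlen]
  rw [hlenc, PySem.List.pyRange_zero_natCast, List.foldl_map]
  have hbody : (fun (s : List String × List String) (k : Nat) =>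
        (s.1.set (↑k : Int).toNat (pvBuildA "D" (PySem.List.pyGetD (pvCatIndicesA g) (↑k) [])),
         s.2.set (↑k : Int).toNat (pvBuildA "E" (PySem.List.pyGetD (pvCatIndicesA g) (↑k) []))))
      = (fun (s : List String × List String) (k : Nat) =>
        (s.1.set k (pvBuildA "D" ((pvCatIndicesA g).getD k [])),
         s.2.set k (pvBuildA "E" ((pvCatIndicesA g).getD k [])))) := by
    funext s k
    rw [PySem.List.pyGetD_natCast, Int.toNat_natCast]
  rw [hbody]
  rw [PySem.List.foldl_prod_mk
    (f := fun (v : List String) (k : Nat) => v.set k (pvBuildA "D" ((pvCatIndicesA g).getD k [])))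
    (g := fun (v : List String) (k : Nat) => v.set k (pvBuildA "E" ((pvCatIndicesA g).getD k [])))]
  have hD := pvFoldlSetMap (fun k => pvBuildA "D" ((pvCatIndicesA g).getD k []))
    (pvCats g).length (List.replicate (pvCats g).length "") (by simp)
  have hE := pvFoldlSetMap (fun k => pvBuildA "E" ((pvCatIndicesA g).getD k []))
    (pvCats g).length (List.replicate (pvCats g).length "") (by simp)
  rw [hD, hE]
  have hmap : ∀ letter : String,
      (List.range (pvCats g).length).map (fun k => pvBuildA letter ((pvCatIndicesA g).getD k []))
        = (pvCats g).map (fun c => pvFormula letter (pvBucket g c)) := by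
    intro letter
    have h1 : (List.range (pvCats g).length).map (fun k => pvBuildA letter ((pvCatIndicesA g).getD k []))
        = (List.range (pvCats g).length).map (fun k => pvFormula letter (pvBucket g ((pvCats g).getD k ""))) := by
      apply List.map_congr_left
      intro k hk
      rw [hget k (List.mem_range.mp hk), pvBuildEqFormula]
    rw [h1]
    exact pvMapRangeGetD (fun c => pvFormula letter (pvBucket g c)) "" (pvCats g)
  rw [hmap "D", hmap "E"]

lemma pvAEq (g : List (List String)) (cn : String) : classAnalysis g cn = pvResult g := by
  unfold classAnalysis pvResult
  rw [pvCategoriesAEq, pvNumDenAEq]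

-- ===== VERDICT (by name: the statement is the Claim_ definition above) =====
theorem classAnalysis_spec : Claim_equal_classAnalysis := by
  intro grades className _ _
  unfold Spec_classAnalysis
  rw [pvAEq grades className, bAlt grades className]
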